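-- pv_equiv track=rewrite | github.com/meenwolf/BachelorAssignment | allFunctions.py | getBuildings
-- ===== SOURCE A (Python) =====
-- def getBuildings(vertices, nodeToCoordinate, returnNonsinglePoints=False):
--     buildings=dict()
--     nonsingleBuildingsfloors=dict()
--     for vertex in vertices:
--         if vertex in nodeToCoordinate: #meaning that the vertex is not representing an elevator.
--             building= nodeToCoordinate[vertex]['Building']
--             floor= nodeToCoordinate[vertex]['Floor']
--             if building in buildings:
--                 if floor in buildings[building]:
--                     if building in nonsingleBuildingsfloors:
--                         nonsingleBuildingsfloors[building].add(floor)
--                     else: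
--                         nonsingleBuildingsfloors[building]={floor}
--                 else:
--                     buildings[building].add(floor)
--             else:
--                 buildings[building] = {floor}
--     if returnNonsinglePoints:
--         return nonsingleBuildingsfloors
--     else:
--         return buildings
-- ===== SOURCE B (Python) =====
-- def getBuildings(vertices, nodeToCoordinate, returnNonsinglePoints=False):
--     # One pass extracts the (building, floor) pairs; then a single flat loop
--     # builds only the requested dictionary, using a plain 'seen' set of pairs
--     # instead of nested membership tests in the buildings dict.
--     pairs = []
--     for vertex in vertices:
--         if vertex in nodeToCoordinate:
--             coord = nodeToCoordinate[vertex]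
--             pairs.append((coord['Building'], coord['Floor']))
--     result = {}
--     if returnNonsinglePoints:
--         seen = set()
--         for b, f in pairs:
--             if (b, f) in seen:
--                 result.setdefault(b, set()).add(f)
--             else:
--                 seen.add((b, f))
--     else:
--         for b, f in pairs:
--             result.setdefault(b, set()).add(f)
--     return result
-- ===== Notes on version B (the rewrite author's own statement) =====
-- stated objective: simpler
-- what changed: B first extracts the (building, floor) pair list in one pass, then builds only the requested dictionary with a single flat loop, replacing A's nested dict-membership cascade by a plain 'seen' set of pairs (a duplicate pair is exactly a pair already seen).
import Mathlib
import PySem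

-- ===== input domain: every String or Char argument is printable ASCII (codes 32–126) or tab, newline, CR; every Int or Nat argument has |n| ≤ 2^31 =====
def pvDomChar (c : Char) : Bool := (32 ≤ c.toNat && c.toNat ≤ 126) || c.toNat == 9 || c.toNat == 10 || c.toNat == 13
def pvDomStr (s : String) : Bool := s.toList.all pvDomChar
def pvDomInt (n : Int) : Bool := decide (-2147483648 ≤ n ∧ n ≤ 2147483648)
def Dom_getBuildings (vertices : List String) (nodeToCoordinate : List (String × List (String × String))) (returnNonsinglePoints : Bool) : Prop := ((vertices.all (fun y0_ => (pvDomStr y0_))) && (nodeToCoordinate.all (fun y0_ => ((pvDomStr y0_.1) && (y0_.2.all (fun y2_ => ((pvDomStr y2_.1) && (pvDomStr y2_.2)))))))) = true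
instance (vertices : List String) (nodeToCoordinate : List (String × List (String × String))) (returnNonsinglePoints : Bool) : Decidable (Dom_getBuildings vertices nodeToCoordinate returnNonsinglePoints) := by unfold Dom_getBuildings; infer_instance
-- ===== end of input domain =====

-- B extracts the (building, floor) pair list once, then builds only the requested dict with one
-- flat loop over pairs and a plain 'seen' set, instead of A's single loop with nested dict
-- membership tests building both dicts at once; same cost, simpler decomposition.

-- ===== PORT A =====
def getBuildings (vertices : List String) (nodeToCoordinate : List (String × List (String × String))) (returnNonsinglePoints : Bool) : List (String × List String) :=
  let n2c : PySem.Dict String (List (String × String)) := PySem.Dict.mk nodeToCoordinate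
  let st := vertices.foldl (fun (st : PySem.Dict String (List String) × PySem.Dict String (List String)) vertex =>
    let buildings := st.1
    let nonsingle := st.2
    match n2c.get? vertex with
    | none => (buildings, nonsingle)
    | some coordRaw =>
      let coord : PySem.Dict String String := PySem.Dict.mk coordRaw
      -- coord['Building'] / coord['Floor']: a KeyError (missing key) is excluded by Pre_,
      -- so getD "" is exact on the admitted inputs
      let building := coord.getD "Building" ""
      let floor := coord.getD "Floor" ""
      if buildings.contains building then
        if floor ∈ buildings.getD building [] then
          if nonsingle.contains building then
            (buildings, nonsingle.modify building [] (fun s => PySem.Set.add s floor))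
          else
            (buildings, nonsingle.insert building [floor])
        else
          (buildings.modify building [] (fun s => PySem.Set.add s floor), nonsingle)
      else
        (buildings.insert building [floor], nonsingle))
    ((PySem.Dict.empty, PySem.Dict.empty))
  if returnNonsinglePoints then st.2.items else st.1.items

-- ===== PORT B =====
def getBuildings_alt (vertices : List String) (nodeToCoordinate : List (String × List (String × String))) (returnNonsinglePoints : Bool) : List (String × List String) :=
  let n2c : PySem.Dict String (List (String × String)) := PySem.Dict.mk nodeToCoordinate
  let pairs := vertices.foldl (fun (acc : List (String × String)) vertex =>
    match n2c.get? vertex with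
    | some coordRaw =>
      let coord : PySem.Dict String String := PySem.Dict.mk coordRaw
      -- KeyError on a missing 'Building'/'Floor' key is excluded by Pre_; getD "" is exact there
      acc ++ [(coord.getD "Building" "", coord.getD "Floor" "")]
    | none => acc) []
  if returnNonsinglePoints then
    (pairs.foldl (fun (st : PySem.Dict String (List String) × List (String × String)) bf =>
        if bf ∈ st.2 then
          (st.1.modify bf.1 [] (fun s => PySem.Set.add s bf.2), st.2)
        else
          (st.1, PySem.Set.add st.2 bf))
      (PySem.Dict.empty, [])).1.items
  else
    (pairs.foldl (fun (res : PySem.Dict String (List String)) bf =>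
        res.modify bf.1 [] (fun s => PySem.Set.add s bf.2))
      PySem.Dict.empty).items

-- ===== PRECONDITION & SPEC =====
-- Pre_ excludes exactly the inputs on which Python A raises KeyError: a vertex present in
-- nodeToCoordinate whose coordinate dict lacks a 'Building' or 'Floor' key (B raises there too).
def Pre_getBuildings (vertices : List String) (nodeToCoordinate : List (String × List (String × String))) (returnNonsinglePoints : Bool) : Prop :=
  ∀ v ∈ vertices,
    ((PySem.Dict.mk nodeToCoordinate).get? v).all
      (fun c => (PySem.Dict.mk c).contains "Building" && (PySem.Dict.mk c).contains "Floor") = true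
instance (vertices : List String) (nodeToCoordinate : List (String × List (String × String))) (returnNonsinglePoints : Bool) : Decidable (Pre_getBuildings vertices nodeToCoordinate returnNonsinglePoints) := by unfold Pre_getBuildings; infer_instance
def pvWitness_getBuildings : List String × (List (String × List (String × String))) × Bool :=
  (["a", "b", "b", "c"],
   ([("a", [("Building", "H"), ("Floor", "1")]), ("b", [("Building", "H"), ("Floor", "1")])], true))

def Spec_getBuildings (vertices : List String) (nodeToCoordinate : List (String × List (String × String))) (returnNonsinglePoints : Bool) (out : List (String × List String)) : Prop := out = getBuildings_alt vertices nodeToCoordinate returnNonsinglePoints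
instance (vertices : List String) (nodeToCoordinate : List (String × List (String × String))) (returnNonsinglePoints : Bool) (out : List (String × List String)) : Decidable (Spec_getBuildings vertices nodeToCoordinate returnNonsinglePoints out) := by unfold Spec_getBuildings; infer_instance

-- ===== CLAIM (what is proved, stated in full; the proofs are below) =====
def Claim_equal_getBuildings : Prop := ∀ (vertices : List String) (nodeToCoordinate : List (String × List (String × String))) (returnNonsinglePoints : Bool), Dom_getBuildings vertices nodeToCoordinate returnNonsinglePoints → Pre_getBuildings vertices nodeToCoordinate returnNonsinglePoints → Spec_getBuildings vertices nodeToCoordinate returnNonsinglePoints (getBuildings vertices nodeToCoordinate returnNonsinglePoints)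

-- ===== LEMMAS AND PROOFS =====

-- the (building, floor) pair a coordinate dict yields
def pvPairOf (coordRaw : List (String × String)) : String × String :=
  ((PySem.Dict.mk coordRaw).getD "Building" "", (PySem.Dict.mk coordRaw).getD "Floor" "")

-- the pairs one vertex contributes (empty when the vertex is not a key)
def pvG (n2c : PySem.Dict String (List (String × String))) (v : String) : List (String × String) :=
  match n2c.get? v with
  | some coordRaw => [pvPairOf coordRaw]
  | none => []

-- B's buildings step (setdefault(b, set()).add(f))
def pvStepB (res : PySem.Dict String (List String)) (bf : String × String) : PySem.Dict String (List String) :=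
  res.modify bf.1 [] (fun s => PySem.Set.add s bf.2)

-- B's nonsingle step
def pvStepN (st : PySem.Dict String (List String) × List (String × String)) (bf : String × String) :
    PySem.Dict String (List String) × List (String × String) :=
  if bf ∈ st.2 then (pvStepB st.1 bf, st.2) else (st.1, PySem.Set.add st.2 bf)

-- A's combined step
def pvStepA (n2c : PySem.Dict String (List (String × String)))
    (st : PySem.Dict String (List String) × PySem.Dict String (List String)) (vertex : String) :
    PySem.Dict String (List String) × PySem.Dict String (List String) :=
  match n2c.get? vertex with
  | none => st
  | some coordRaw =>
    let building := (pvPairOf coordRaw).1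
    let floor := (pvPairOf coordRaw).2
    if st.1.contains building then
      if floor ∈ st.1.getD building [] then
        if st.2.contains building then
          (st.1, st.2.modify building [] (fun s => PySem.Set.add s floor))
        else
          (st.1, st.2.insert building [floor])
      else
        (st.1.modify building [] (fun s => PySem.Set.add s floor), st.2)
    else
      (st.1.insert building [floor], st.2)

lemma dict_insert_eq_self (d : PySem.Dict String (List String)) (k : String) (v : List String)
    (hnd : d.keys.Nodup) (h : d.get? k = some v) : d.insert k v = d := by
  have hc : d.contains k = true := by
    rw [PySem.Dict.contains_eq_isSome_get?, h]; rfl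
  apply PySem.Dict.ext
  rw [PySem.Dict.items_insert_of_contains _ _ hc]
  conv_rhs => rw [← List.map_id d.items]
  apply List.map_congr_left
  intro p hp
  obtain ⟨p1, p2⟩ := p
  by_cases hpk : p1 = k
  · subst hpk
    have hget : d.get? p1 = some p2 := PySem.Dict.get?_of_mem_items d hp hnd
    rw [h] at hget
    simp [show v = p2 from Option.some_inj.mp hget]
  · simp [hpk]

lemma set_add_of_mem (s : List String) (x : String) (h : x ∈ s) : PySem.Set.add s x = s := by
  simp [PySem.Set.add, PySem.Set.contains, h]

lemma stepB_eq_astep (bu : PySem.Dict String (List String)) (b f : String) (hnd : bu.keys.Nodup) :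
    pvStepB bu (b, f) =
      if bu.contains b then
        if f ∈ bu.getD b [] then bu
        else bu.modify b [] (fun s => PySem.Set.add s f)
      else bu.insert b [f] := by
  by_cases hc : bu.contains b = true
  · simp only [hc, if_true]
    by_cases hf : f ∈ bu.getD b []
    · simp only [hf, if_true]
      obtain ⟨v, hv⟩ : ∃ v, bu.get? b = some v := by
        rcases ho : bu.get? b with _ | v
        · rw [PySem.Dict.contains_eq_isSome_get?, ho] at hc; simp at hc
        · exact ⟨v, rfl⟩
      have hgd : bu.getD b [] = v := by simp [PySem.Dict.getD, hv]
      rw [hgd] at hf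
      show bu.insert b (PySem.Set.add (bu.getD b []) f) = bu
      rw [hgd, set_add_of_mem _ _ hf]
      exact dict_insert_eq_self bu b v hnd hv
    · simp [hf, pvStepB]
  · simp only [Bool.not_eq_true] at hc
    simp only [hc, Bool.false_eq_true, if_false]
    show bu.insert b (PySem.Set.add (bu.getD b []) f) = bu.insert b [f]
    rw [PySem.Dict.getD_of_not_contains _ _ hc]
    rfl

lemma nsstep_eq (ns : PySem.Dict String (List String)) (b f : String) :
    pvStepB ns (b, f) =
      if ns.contains b then ns.modify b [] (fun s => PySem.Set.add s f)
      else ns.insert b [f] := by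
  by_cases hc : ns.contains b = true
  · simp [hc, pvStepB]
  · simp only [Bool.not_eq_true] at hc
    simp only [hc, Bool.false_eq_true, if_false]
    show ns.insert b (PySem.Set.add (ns.getD b []) f) = ns.insert b [f]
    rw [PySem.Dict.getD_of_not_contains _ _ hc]
    rfl

lemma mem_getD_contains (bu : PySem.Dict String (List String)) (b f : String)
    (h : f ∈ bu.getD b []) : bu.contains b = true := by
  by_contra hc
  simp only [Bool.not_eq_true] at hc
  rw [PySem.Dict.getD_of_not_contains _ _ hc] at h
  simp at h

-- the coupled induction: A's fold = B's two folds, under the seen/buildings invariant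
lemma pv_main (n2c : PySem.Dict String (List (String × String))) :
    ∀ (vs : List String) (bu ns : PySem.Dict String (List String)) (seen : List (String × String)),
      bu.keys.Nodup →
      (∀ b f, f ∈ bu.getD b [] ↔ (b, f) ∈ seen) →
      (vs.foldl (pvStepA n2c) (bu, ns)).1 = (vs.flatMap (pvG n2c)).foldl pvStepB bu ∧
      (vs.foldl (pvStepA n2c) (bu, ns)).2 = ((vs.flatMap (pvG n2c)).foldl pvStepN (ns, seen)).1 := by
  intro vs
  induction vs with
  | nil => intro bu ns seen _ _; exact ⟨rfl, rfl⟩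
  | cons v vs ih =>
    intro bu ns seen hnd hinv
    rcases ho : n2c.get? v with _ | coordRaw
    · have hg : pvG n2c v = [] := by simp [pvG, ho]
      have hs : pvStepA n2c (bu, ns) v = (bu, ns) := by simp [pvStepA, ho]
      simp only [List.foldl_cons, List.flatMap_cons, hg, List.nil_append, hs]
      exact ih bu ns seen hnd hinv
    · have hg : pvG n2c v = [pvPairOf coordRaw] := by simp [pvG, ho]
      -- the A step
      by_cases hseen : ((pvPairOf coordRaw).1, (pvPairOf coordRaw).2) ∈ seen
      · -- duplicate pair: buildings unchanged, nonsingle updated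
        have hm : (pvPairOf coordRaw).2 ∈ bu.getD (pvPairOf coordRaw).1 [] := (hinv _ _).mpr hseen
        have hc : bu.contains (pvPairOf coordRaw).1 = true := mem_getD_contains _ _ _ hm
        have hsA : pvStepA n2c (bu, ns) v = (bu, pvStepB ns (pvPairOf coordRaw)) := by
          rw [show pvStepB ns (pvPairOf coordRaw) = _ from nsstep_eq ns (pvPairOf coordRaw).1 (pvPairOf coordRaw).2]
          simp only [pvStepA, ho, hc, hm, if_true]
          split <;> rfl
        have hsB : pvStepB bu (pvPairOf coordRaw) = bu := by
          rw [show pvPairOf coordRaw = ((pvPairOf coordRaw).1, (pvPairOf coordRaw).2) from rfl,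
            stepB_eq_astep bu _ _ hnd]
          simp [hc, hm]
        have hsN : pvStepN (ns, seen) (pvPairOf coordRaw) = (pvStepB ns (pvPairOf coordRaw), seen) := by
          simp [pvStepN, hseen]
        simp only [List.foldl_cons, List.flatMap_cons, hg, List.singleton_append, hsA, hsB, hsN]
        exact ih bu (pvStepB ns (pvPairOf coordRaw)) seen hnd hinv
      · -- fresh pair: buildings updated, nonsingle unchanged, seen grows
        have hm : ¬ (pvPairOf coordRaw).2 ∈ bu.getD (pvPairOf coordRaw).1 [] := fun h => hseen ((hinv _ _).mp h)
        have hsA : pvStepA n2c (bu, ns) v = (pvStepB bu (pvPairOf coordRaw), ns) := by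
          rw [show pvStepB bu (pvPairOf coordRaw) = _ from stepB_eq_astep bu (pvPairOf coordRaw).1 (pvPairOf coordRaw).2 hnd]
          by_cases hc : bu.contains (pvPairOf coordRaw).1 = true
          · simp [pvStepA, ho, hc, hm]
          · simp only [Bool.not_eq_true] at hc
            simp [pvStepA, ho, hc]
        have hsN : pvStepN (ns, seen) (pvPairOf coordRaw) = (ns, PySem.Set.add seen (pvPairOf coordRaw)) := by
          simp [pvStepN, hseen]
        simp only [List.foldl_cons, List.flatMap_cons, hg, List.singleton_append, hsA, hsN]
        apply ih
        · exact PySem.Dict.nodup_keys_insert _ _ _ hnd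
        · intro b' f'
          show f' ∈ (bu.modify (pvPairOf coordRaw).1 [] (fun s => PySem.Set.add s (pvPairOf coordRaw).2)).getD b' [] ↔ _
          rw [PySem.Dict.getD_modify]
          by_cases hb : b' = (pvPairOf coordRaw).1
          · subst hb
            simp only [if_true]
            rw [PySem.Set.mem_add, PySem.Set.mem_add, hinv]
            apply or_congr_right
            constructor
            · rintro rfl; rfl
            · intro h
              have := congrArg Prod.snd h
              simpa using this
          · simp only [hb, if_false]
            rw [hinv b' f', PySem.Set.mem_add]
            constructor
            · intro h; exact Or.inl h
            · rintro (h | h)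
              · exact h
              · exact absurd (congrArg Prod.fst h) hb

-- B's pairs-extraction step
def pvPairsStep (n2c : PySem.Dict String (List (String × String)))
    (acc : List (String × String)) (vertex : String) : List (String × String) :=
  match n2c.get? vertex with
  | some coordRaw => acc ++ [pvPairOf coordRaw]
  | none => acc

-- the B-side pairs loop is a flatMap
lemma pairs_eq_flatMap (n2c : PySem.Dict String (List (String × String))) :
    ∀ (vs : List String) (acc : List (String × String)),
      vs.foldl (pvPairsStep n2c) acc = acc ++ vs.flatMap (pvG n2c) := by
  intro vs
  induction vs with
  | nil => intro acc; simp
  | cons v vs ih =>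
    intro acc
    rcases ho : n2c.get? v with _ | coordRaw
    · rw [List.foldl_cons, ih]
      simp [pvPairsStep, pvG, ho]
    · rw [List.foldl_cons, ih]
      simp [pvPairsStep, pvG, ho]

-- ===== VERDICT (by name: the statement is the Claim_ definition above) =====
theorem getBuildings_spec : Claim_equal_getBuildings := by
  intro vertices nodeToCoordinate returnNonsinglePoints _ _
  unfold Spec_getBuildings
  have hA : getBuildings vertices nodeToCoordinate returnNonsinglePoints =
      (if returnNonsinglePoints then
        (vertices.foldl (pvStepA (PySem.Dict.mk nodeToCoordinate)) (PySem.Dict.empty, PySem.Dict.empty)).2.items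
      else
        (vertices.foldl (pvStepA (PySem.Dict.mk nodeToCoordinate)) (PySem.Dict.empty, PySem.Dict.empty)).1.items) := rfl
  have hB : getBuildings_alt vertices nodeToCoordinate returnNonsinglePoints =
      (if returnNonsinglePoints then
        ((vertices.foldl (pvPairsStep (PySem.Dict.mk nodeToCoordinate)) []).foldl pvStepN (PySem.Dict.empty, [])).1.items
      else
        ((vertices.foldl (pvPairsStep (PySem.Dict.mk nodeToCoordinate)) []).foldl pvStepB PySem.Dict.empty).items) := rfl
  rw [hA, hB, pairs_eq_flatMap, List.nil_append]
  have hmain := pv_main (PySem.Dict.mk nodeToCoordinate) vertices PySem.Dict.empty PySem.Dict.empty []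
    (by simp [PySem.Dict.empty, PySem.Dict.keys])
    (by intro b f; simp [PySem.Dict.getD_empty])
  cases returnNonsinglePoints with
  | false => simp only [if_false, Bool.false_eq_true]; exact congrArg PySem.Dict.items hmain.1
  | true => simp only [if_true]; exact congrArg PySem.Dict.items hmain.2
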